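-- pv_equiv track=rewrite | github.com/DavidTokar12/pontosje | pontosje-algorithm/algorithm/datasets/data_preperation/process_ertelmezo_szotar.py | partition_into_words
-- ===== SOURCE A (Python) =====
-- def partition_into_words(ordered_classifications):
--
--     partition_indexes = []
--
--     i = 0
--     while i < len(ordered_classifications) - 3:
--         (current_classification, text1) = ordered_classifications[i]
--         (next_classification, text2) = ordered_classifications[i + 1]
--         (next_next_classification, text3) = ordered_classifications[i + 2]
--         (next_next_next_classification, text4) = ordered_classifications[i + 3]
--
--         if current_classification == "word" and next_classification == "stars":
--             partition_indexes.append(i)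
--             i += 2  # Skip the next classification to avoid overlap
--             continue
--
--         if current_classification == "word" and next_classification == "word" and next_next_classification == "stars":
--             partition_indexes.append(i)
--             i += 3  # Skip the next classification to avoid overlap
--             continue
--
--         if current_classification == "word" and next_classification == "word" and next_next_classification == "word" and next_next_next_classification == "stars":
--             partition_indexes.append(i)
--             i += 4  # Skip the next classification to avoid overlap
--             continue
--
--         if (
--             current_classification == "word"
--             and next_classification == "separator"
--             and next_next_classification == "word"
--             and next_next_next_classification == "stars"
--         ):
--             partition_indexes.append(i)
--             i += 4  # Skip the next three classifications to avoid overlap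
--             continue
--
--         i += 1
--
--     partitions = []
--
--     for i in range(len(partition_indexes)):
--
--         start_index = partition_indexes[i]
--
--         if i + 1 < len(partition_indexes):
--             end_index = partition_indexes[i + 1]
--         else:
--             end_index = len(ordered_classifications)
--
--         partitions.append(ordered_classifications[start_index:end_index])
--
--     return partitions
-- ===== SOURCE B (Python) =====
-- def partition_into_words(ordered_classifications):
--
--     def boundary_len(ocs, i):
--         c0 = ocs[i][0]
--         if c0 != "word":
--             return None
--         c1 = ocs[i + 1][0]
--         if c1 == "stars":
--             return 2
--         c2 = ocs[i + 2][0]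
--         c3 = ocs[i + 3][0]
--         if c1 == "word":
--             if c2 == "stars":
--                 return 3
--             if c2 == "word" and c3 == "stars":
--                 return 4
--             return None
--         if c1 == "separator" and c2 == "word" and c3 == "stars":
--             return 4
--         return None
--
--     n = len(ordered_classifications)
--     parts = []
--     current = None  # the partition being built, element by element; None before the first boundary
--     i = 0
--     while i + 4 <= n:
--         k = boundary_len(ordered_classifications, i)
--         if k is None:
--             if current is not None:
--                 current.append(ordered_classifications[i])
--             i += 1
--         else:
--             if current is not None:
--                 parts.append(current)
--             current = list(ordered_classifications[i:i + k])
--             i += k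
--     if current is not None:
--         current.extend(ordered_classifications[i:])
--         parts.append(current)
--     return parts
-- ===== Notes on version B (the rewrite author's own statement) =====
-- stated objective: alternative
-- what changed: B never records boundary indexes or slices between them: it builds each partition element-by-element in a running accumulator (appending each scanned item to the open partition, closing it when the next boundary fires), with the four boundary patterns factored into a helper returning the matched pattern length.
import Mathlib
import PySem

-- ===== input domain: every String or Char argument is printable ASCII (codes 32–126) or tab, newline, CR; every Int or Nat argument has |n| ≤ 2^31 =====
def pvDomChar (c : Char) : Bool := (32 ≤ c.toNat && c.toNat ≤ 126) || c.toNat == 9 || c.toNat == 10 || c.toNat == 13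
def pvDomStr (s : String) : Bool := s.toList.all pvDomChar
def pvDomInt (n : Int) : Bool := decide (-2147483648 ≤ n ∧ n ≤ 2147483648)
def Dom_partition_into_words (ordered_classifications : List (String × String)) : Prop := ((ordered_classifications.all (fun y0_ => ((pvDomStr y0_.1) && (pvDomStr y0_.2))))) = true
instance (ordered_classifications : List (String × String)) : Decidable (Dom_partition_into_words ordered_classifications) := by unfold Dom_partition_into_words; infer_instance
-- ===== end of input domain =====

-- B builds each partition element-by-element in a running accumulator (no boundary-index
-- table, no slicing between recorded indexes), with the boundary test factored into a
-- helper returning the matched pattern length. Objective: alternative decomposition.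

-- ===== PORT A =====
-- the while-loop collecting partition_indexes; fuel = list length bounds the
-- iteration count (the loop index strictly increases and stays below length)
def pvScanA (ocs : List (String × String)) (n : Nat) : Nat → Nat → List Nat
  | 0, _ => []
  | fuel + 1, i =>
    if i + 3 < n then
      let c0 := (ocs.getD i ("", "")).1
      let c1 := (ocs.getD (i + 1) ("", "")).1
      let c2 := (ocs.getD (i + 2) ("", "")).1
      let c3 := (ocs.getD (i + 3) ("", "")).1
      if c0 = "word" ∧ c1 = "stars" then
        i :: pvScanA ocs n fuel (i + 2)
      else if c0 = "word" ∧ c1 = "word" ∧ c2 = "stars" then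
        i :: pvScanA ocs n fuel (i + 3)
      else if c0 = "word" ∧ c1 = "word" ∧ c2 = "word" ∧ c3 = "stars" then
        i :: pvScanA ocs n fuel (i + 4)
      else if c0 = "word" ∧ c1 = "separator" ∧ c2 = "word" ∧ c3 = "stars" then
        i :: pvScanA ocs n fuel (i + 4)
      else
        pvScanA ocs n fuel (i + 1)
    else []

-- the second loop: for i in range(len(partition_indexes)): append ocs[start:end]
def pvPartsA (ocs : List (String × String)) (n : Nat) (idxs : List Nat) :
    List (List (String × String)) :=
  (List.range idxs.length).map (fun k =>
    let start_index := idxs.getD k 0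
    let end_index := if k + 1 < idxs.length then idxs.getD (k + 1) 0 else n
    PySem.List.slice ocs (some (start_index : Int)) (some (end_index : Int)))

def partition_into_words (ordered_classifications : List (String × String)) :
    List (List (String × String)) :=
  pvPartsA ordered_classifications ordered_classifications.length
    (pvScanA ordered_classifications ordered_classifications.length
      ordered_classifications.length 0)

-- ===== PORT B =====
-- boundary_len helper: the length (2/3/4) of the boundary pattern starting at i, or none
def pvBoundaryLen (ocs : List (String × String)) (i : Nat) : Option Nat :=
  let c0 := (ocs.getD i ("", "")).1
  if c0 ≠ "word" then none
  else
    let c1 := (ocs.getD (i + 1) ("", "")).1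
    if c1 = "stars" then some 2
    else
      let c2 := (ocs.getD (i + 2) ("", "")).1
      let c3 := (ocs.getD (i + 3) ("", "")).1
      if c1 = "word" then
        if c2 = "stars" then some 3
        else if c2 = "word" ∧ c3 = "stars" then some 4
        else none
      else if c1 = "separator" ∧ c2 = "word" ∧ c3 = "stars" then some 4
      else none

-- the single while-loop: cur is the partition under construction (none before the first
-- boundary); at loop exit the remaining items ocs[i:] complete the open partition
def pvScanB (ocs : List (String × String)) (n : Nat) :
    Nat → Nat → Option (List (String × String)) → List (List (String × String))
  | 0, i, cur =>
    (match cur with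
      | some c => [c ++ PySem.List.slice ocs (some (i : Int)) none]
      | none => [])
  | fuel + 1, i, cur =>
    if i + 4 ≤ n then
      match pvBoundaryLen ocs i with
      | none =>
        (match cur with
          | some c => pvScanB ocs n fuel (i + 1) (some (c ++ [ocs.getD i ("", "")]))
          | none => pvScanB ocs n fuel (i + 1) none)
      | some k =>
        let newcur := PySem.List.slice ocs (some (i : Int)) (some ((i + k : Nat) : Int))
        (match cur with
          | some c => c :: pvScanB ocs n fuel (i + k) (some newcur)
          | none => pvScanB ocs n fuel (i + k) (some newcur))
    else
      match cur with
      | some c => [c ++ PySem.List.slice ocs (some (i : Int)) none]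
      | none => []

def partition_into_words_alt (ordered_classifications : List (String × String)) :
    List (List (String × String)) :=
  pvScanB ordered_classifications ordered_classifications.length
    ordered_classifications.length 0 none

-- ===== PRECONDITION & SPEC =====
def Spec_partition_into_words (ordered_classifications : List (String × String)) (out : List (List (String × String))) : Prop := out = partition_into_words_alt ordered_classifications
instance (ordered_classifications : List (String × String)) (out : List (List (String × String))) : Decidable (Spec_partition_into_words ordered_classifications out) := by unfold Spec_partition_into_words; infer_instance

-- ===== CLAIM (what is proved, stated in full; the proofs are below) =====
def Claim_equal_partition_into_words : Prop := ∀ (ordered_classifications : List (String × String)), Dom_partition_into_words ordered_classifications → Spec_partition_into_words ordered_classifications (partition_into_words ordered_classifications)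

-- ===== LEMMAS AND PROOFS =====

-- recursive characterisation of A's second loop
def pvPartsRec (ocs : List (String × String)) (n : Nat) : List Nat → List (List (String × String))
  | [] => []
  | p :: rest =>
      PySem.List.slice ocs (some (p : Int))
        (some ((rest.headD n : Nat) : Int)) :: pvPartsRec ocs n rest

theorem pvPartsA_eq_rec (ocs : List (String × String)) (n : Nat) (idxs : List Nat) :
    pvPartsA ocs n idxs = pvPartsRec ocs n idxs := by
  induction idxs with
  | nil => rfl
  | cons p rest ih =>
    simp only [pvPartsA, pvPartsRec, List.length_cons, List.range_succ_eq_map,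
      List.map_cons, List.map_map]
    congr 1
    · cases rest with
      | nil => simp
      | cons q t => simp [List.getD]
    · rw [← ih]
      unfold pvPartsA
      refine List.map_congr_left ?_
      intro k hk
      simp [Function.comp]

-- ocs[p:i] ++ [ocs[i]] = ocs[p:i+1]  (p ≤ i < len)
theorem pvSliceSnoc (ocs : List (String × String)) (p i : Nat) (hp : p ≤ i)
    (hi : i < ocs.length) :
    PySem.List.slice ocs (some (p : Int)) (some (i : Int)) ++ [ocs.getD i ("", "")] =
      PySem.List.slice ocs (some (p : Int)) (some ((i + 1 : Nat) : Int)) := by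
  rw [PySem.List.slice_natCast, PySem.List.slice_natCast]
  have h1 : i + 1 - p = (i - p) + 1 := by omega
  rw [h1, List.take_succ]
  congr 1
  have h2 : (ocs.drop p)[i - p]? = ocs[i]? := by
    rw [List.getElem?_drop]; congr 1; omega
  rw [h2, List.getElem?_eq_getElem hi]
  simp [List.getD, List.getElem?_eq_getElem hi]

-- ocs[p:i] ++ ocs[i:] = ocs[p:len]  (p ≤ i ≤ len)
theorem pvSliceCat (ocs : List (String × String)) (p i : Nat) (hp : p ≤ i)
    (hi : i ≤ ocs.length) :
    PySem.List.slice ocs (some (p : Int)) (some (i : Int)) ++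
        PySem.List.slice ocs (some (i : Int)) none =
      PySem.List.slice ocs (some (p : Int)) (some ((ocs.length : Nat) : Int)) := by
  rw [PySem.List.slice_natCast, PySem.List.slice_from_natCast, PySem.List.slice_natCast]
  have h : ocs.drop i = (ocs.drop p).drop (i - p) := by
    rw [List.drop_drop]; congr 1; omega
  rw [h, List.take_append_drop, List.take_of_length_le (by simp)]

-- pvBoundaryLen aligned with A's if-chain
theorem pvBoundaryLen_eq (ocs : List (String × String)) (i : Nat) :
    pvBoundaryLen ocs i =
      (if (ocs.getD i ("", "")).1 = "word" ∧ (ocs.getD (i + 1) ("", "")).1 = "stars" then some 2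
       else if (ocs.getD i ("", "")).1 = "word" ∧ (ocs.getD (i + 1) ("", "")).1 = "word" ∧
           (ocs.getD (i + 2) ("", "")).1 = "stars" then some 3
       else if (ocs.getD i ("", "")).1 = "word" ∧ (ocs.getD (i + 1) ("", "")).1 = "word" ∧
           (ocs.getD (i + 2) ("", "")).1 = "word" ∧ (ocs.getD (i + 3) ("", "")).1 = "stars" then some 4
       else if (ocs.getD i ("", "")).1 = "word" ∧ (ocs.getD (i + 1) ("", "")).1 = "separator" ∧
           (ocs.getD (i + 2) ("", "")).1 = "word" ∧ (ocs.getD (i + 3) ("", "")).1 = "stars" then some 4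
       else none) := by
  simp only [pvBoundaryLen]
  split_ifs <;> simp_all

-- B's scan computes the recursive partition of (prev? ++ A's boundary list);
-- the accumulator for previous boundary p at index i is exactly ocs[p:i]
theorem pvScanB_eq (ocs : List (String × String)) :
    ∀ (fuel i : Nat), i ≤ ocs.length →
    (pvScanB ocs ocs.length fuel i none =
      pvPartsRec ocs ocs.length (pvScanA ocs ocs.length fuel i)) ∧
    ∀ p : Nat, p ≤ i →
      pvScanB ocs ocs.length fuel i
          (some (PySem.List.slice ocs (some (p : Int)) (some (i : Int)))) =
        pvPartsRec ocs ocs.length (p :: pvScanA ocs ocs.length fuel i) := by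
  intro fuel
  induction fuel with
  | zero =>
    intro i hi
    refine ⟨rfl, fun p hp => ?_⟩
    simp only [pvScanA, pvScanB, pvPartsRec, List.headD_nil]
    rw [pvSliceCat ocs p i hp hi]
  | succ fuel ih =>
    intro i hi
    by_cases h : i + 3 < ocs.length
    · have h4 : i + 4 ≤ ocs.length := by omega
      by_cases h1 : (ocs.getD i ("", "")).1 = "word" ∧ (ocs.getD (i + 1) ("", "")).1 = "stars"
      · have hBL : pvBoundaryLen ocs i = some 2 := by
          rw [pvBoundaryLen_eq, if_pos h1]
        refine ⟨?_, fun p hp => ?_⟩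
        · rw [pvScanA, pvScanB]
          simp only [if_pos h, if_pos h4, hBL, if_pos h1]
          exact_mod_cast (ih (i + 2) (by omega)).2 i (by omega)
        · rw [pvScanA, pvScanB]
          simp only [if_pos h, if_pos h4, hBL, if_pos h1]
          have := (ih (i + 2) (by omega)).2 i (by omega)
          rw [this]
          simp [pvPartsRec]
      · by_cases h2 : (ocs.getD i ("", "")).1 = "word" ∧ (ocs.getD (i + 1) ("", "")).1 = "word" ∧ (ocs.getD (i + 2) ("", "")).1 = "stars"
        · have hBL : pvBoundaryLen ocs i = some 3 := by
            rw [pvBoundaryLen_eq, if_neg h1, if_pos h2]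
          refine ⟨?_, fun p hp => ?_⟩
          · rw [pvScanA, pvScanB]
            simp only [if_pos h, if_pos h4, hBL, if_neg h1, if_pos h2]
            exact_mod_cast (ih (i + 3) (by omega)).2 i (by omega)
          · rw [pvScanA, pvScanB]
            simp only [if_pos h, if_pos h4, hBL, if_neg h1, if_pos h2]
            have := (ih (i + 3) (by omega)).2 i (by omega)
            rw [this]
            simp [pvPartsRec]
        · by_cases h3 : (ocs.getD i ("", "")).1 = "word" ∧ (ocs.getD (i + 1) ("", "")).1 = "word" ∧ (ocs.getD (i + 2) ("", "")).1 = "word" ∧ (ocs.getD (i + 3) ("", "")).1 = "stars"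
          · have hBL : pvBoundaryLen ocs i = some 4 := by
              rw [pvBoundaryLen_eq, if_neg h1, if_neg h2, if_pos h3]
            refine ⟨?_, fun p hp => ?_⟩
            · rw [pvScanA, pvScanB]
              simp only [if_pos h, if_pos h4, hBL, if_neg h1, if_neg h2, if_pos h3]
              exact_mod_cast (ih (i + 4) (by omega)).2 i (by omega)
            · rw [pvScanA, pvScanB]
              simp only [if_pos h, if_pos h4, hBL, if_neg h1, if_neg h2, if_pos h3]
              have := (ih (i + 4) (by omega)).2 i (by omega)
              rw [this]
              simp [pvPartsRec]
          · by_cases hsep : (ocs.getD i ("", "")).1 = "word" ∧ (ocs.getD (i + 1) ("", "")).1 = "separator" ∧ (ocs.getD (i + 2) ("", "")).1 = "word" ∧ (ocs.getD (i + 3) ("", "")).1 = "stars"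
            · have hBL : pvBoundaryLen ocs i = some 4 := by
                rw [pvBoundaryLen_eq, if_neg h1, if_neg h2, if_neg h3, if_pos hsep]
              refine ⟨?_, fun p hp => ?_⟩
              · rw [pvScanA, pvScanB]
                simp only [if_pos h, if_pos h4, hBL, if_neg h1, if_neg h2, if_neg h3, if_pos hsep]
                exact_mod_cast (ih (i + 4) (by omega)).2 i (by omega)
              · rw [pvScanA, pvScanB]
                simp only [if_pos h, if_pos h4, hBL, if_neg h1, if_neg h2, if_neg h3, if_pos hsep]
                have := (ih (i + 4) (by omega)).2 i (by omega)
                rw [this]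
                simp [pvPartsRec]
            · have hBL : pvBoundaryLen ocs i = none := by
                rw [pvBoundaryLen_eq, if_neg h1, if_neg h2, if_neg h3, if_neg hsep]
              refine ⟨?_, fun p hp => ?_⟩
              · rw [pvScanA, pvScanB]
                simp only [if_pos h, if_pos h4, hBL, if_neg h1, if_neg h2, if_neg h3, if_neg hsep]
                exact (ih (i + 1) (by omega)).1
              · rw [pvScanA, pvScanB]
                simp only [if_pos h, if_pos h4, hBL, if_neg h1, if_neg h2, if_neg h3, if_neg hsep]
                rw [pvSliceSnoc ocs p i hp (by omega)]
                have := (ih (i + 1) (by omega)).2 p (by omega)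
                exact_mod_cast this
    · refine ⟨?_, fun p hp => ?_⟩
      · rw [pvScanA, pvScanB, if_neg (show ¬ i + 4 ≤ ocs.length by omega)]
        simp only [if_neg h]
        rfl
      · rw [pvScanA, pvScanB, if_neg (show ¬ i + 4 ≤ ocs.length by omega)]
        simp only [if_neg h, pvPartsRec, List.headD_nil]
        rw [pvSliceCat ocs p i hp hi]

-- ===== VERDICT (by name: the statement is the Claim_ definition above) =====
theorem partition_into_words_spec : Claim_equal_partition_into_words := by
  intro ocs _
  unfold Spec_partition_into_words partition_into_words partition_into_words_alt
  rw [pvPartsA_eq_rec, (pvScanB_eq ocs ocs.length 0 (by omega)).1]
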